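-- pv_equiv track=rewrite | github.com/ruediger/esp32-stuff | ssd1306/main/generate_glyphs.py | to_buffer
-- ===== SOURCE A (Python) =====
-- from typing import List, Sequence
--
-- def split_glyph(d: str) -> (int, int, List[str]):
--     """Split glyph and return width, height, and glyph broken into lines."""
--     lines = d.split('\n')
--     if len(lines) == 0:
--         return (0, 0, [])
--     while len(lines[0]) == 0:  # Remove empty frist line if char starts with \n
--         lines.pop(0)
--     height = len(lines)
--     width = max([len(line) for line in lines])
--     return (width, height, lines)
--
-- def set_pixel(buffer: Sequence[int], width: int, x: int, y: int) -> None: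
--     """Set pixel at x,y in buffer with width."""
--     buffer[x + y//8 * width] |= 1 << (y & 7)
--
-- def buffer_size(width: int, height: int) -> int:
--     """Return buffer size."""
--     return width * ((height + 7) // 8)
--
-- def to_buffer(d: str) -> List[int]:
--     """Convert text representation into binary (SSD1306) format."""
--     width, height, lines = split_glyph(d)
--     buffer = [0] * buffer_size(width, height)
--     x = 0
--     y = 0
--     for line in lines:
--         for c in line:
--             if c != ' ':
--                 set_pixel(buffer, width, x, y)
--             x += 1
--         y += 1
--         x = 0
--     return buffer
-- ===== SOURCE B (Python) =====
-- from typing import List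
--
-- def to_buffer(d: str) -> List[int]:
--     """Convert text representation into binary (SSD1306) format."""
--     lines = d.split('\n')
--     while lines and not lines[0]:  # drop leading empty lines
--         lines.pop(0)
--     height = len(lines)
--     width = max(len(line) for line in lines)  # ValueError on a blank glyph
--
--     def byte_at(b: int, x: int) -> int:
--         v = 0
--         for y in range(8 * b, 8 * b + 8):
--             if y < height and x < len(lines[y]) and lines[y][x] != ' ':
--                 v |= 1 << (y & 7)
--         return v
--
--     return [byte_at(b, x)
--             for b in range((height + 7) // 8)
--             for x in range(width)]
-- ===== Notes on version B (the rewrite author's own statement) =====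
-- stated objective: alternative
-- what changed: A scatters pixels row by row into a preallocated buffer (buffer[x + y//8*width] |= bit); B gathers each output byte directly, iterating bands and columns and OR-ing the bits of the 8 rows of that band, appending bytes in output order.
-- outside the precondition, e.g. on to_buffer('\n\n'): A raises IndexError, B raises ValueError
import Mathlib
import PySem

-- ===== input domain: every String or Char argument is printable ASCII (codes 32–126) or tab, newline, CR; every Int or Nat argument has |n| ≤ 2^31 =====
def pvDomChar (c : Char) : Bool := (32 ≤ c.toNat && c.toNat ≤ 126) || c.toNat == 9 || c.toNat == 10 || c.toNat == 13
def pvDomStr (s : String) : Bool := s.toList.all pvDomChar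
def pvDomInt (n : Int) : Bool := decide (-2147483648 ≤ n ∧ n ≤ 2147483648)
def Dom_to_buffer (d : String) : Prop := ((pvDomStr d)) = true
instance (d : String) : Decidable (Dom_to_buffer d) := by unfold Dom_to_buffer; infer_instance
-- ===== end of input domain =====

-- B re-implements A's row-major pixel-scatter as a band/column-major gather of each
-- output byte (same values; objective: alternative decomposition, no speed claim).

-- ===== PORT A =====

-- A's 'while len(lines[0]) == 0: lines.pop(0)'; none = IndexError (all lines empty)
def pvDropEmptyA : List (List Char) → Option (List (List Char))
  | [] => none
  | l :: ls => if l.length = 0 then pvDropEmptyA ls else some (l :: ls)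

-- split_glyph
def split_glyphA (d : String) : Option (Nat × Nat × List (List Char)) :=
  let lines := PySem.Chars.splitOn d.toList ['\n']
  if lines.length = 0 then some (0, 0, [])
  else
    match pvDropEmptyA lines with
    | none => none
    | some lines =>
      let height := lines.length
      -- max([len(line) for line in lines]): lines is nonempty here and lengths are ≥ 0,
      -- so Python's max equals the running max with seed 0
      let width := (lines.map List.length).foldl max 0
      some (width, height, lines)

-- buffer[x + y//8 * width] |= 1 << (y & 7); on every admitted input the index is in
-- range (x < width, y < height), where List.set/getD agree with Python indexing
def set_pixelA (buffer : List Int) (width x y : Nat) : List Int :=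
  buffer.set (x + y / 8 * width) (Int.lor (buffer.getD (x + y / 8 * width) 0) ((1 : Int) <<< (y % 8 : Nat)))

def buffer_sizeA (width height : Nat) : Nat := width * ((height + 7) / 8)

def to_buffer (d : String) : List Int :=
  match split_glyphA d with
  | none => []  -- A raises IndexError here; excluded by Pre_to_buffer
  | some (width, height, lines) =>
    let buffer := List.replicate (buffer_sizeA width height) (0 : Int)
    (lines.foldl (fun (st : List Int × Nat) line =>
        ((line.foldl (fun (st2 : List Int × Nat) c =>
            (if c ≠ ' ' then set_pixelA st2.1 width st2.2 st.2 else st2.1, st2.2 + 1))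
          (st.1, 0)).1, st.2 + 1))
      (buffer, 0)).1

-- ===== PORT B =====

-- byte_at(b, x): OR together the bits of the 8 rows of band b at column x
def glyph_byteB (lines : List (List Char)) (height b x : Nat) : Int :=
  (List.range' (8 * b) 8).foldl (fun v y =>
    if y < height ∧ x < (lines.getD y []).length ∧ (lines.getD y []).getD x ' ' ≠ ' '
    then Int.lor v ((1 : Int) <<< (y % 8 : Nat)) else v) 0

def to_buffer_alt (d : String) : List Int :=
  match (PySem.Chars.splitOn d.toList ['\n']).dropWhile (fun l => l.isEmpty) with
  | [] => []  -- B's max() raises ValueError here; excluded by Pre_to_buffer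
  | l :: ls =>
    let lines := l :: ls
    let height := lines.length
    let width := (ls.map List.length).foldl max l.length  -- max over the nonempty list
    (List.range ((height + 7) / 8)).flatMap (fun b =>
      (List.range width).map (fun x => glyph_byteB lines height b x))

-- ===== PRECONDITION & SPEC =====
-- Pre_ excludes blank glyphs (every line of d empty, i.e. d is empty or all '\n'):
-- there A raises IndexError (and B raises ValueError).
def Pre_to_buffer (d : String) : Prop :=
  ∃ l ∈ PySem.Chars.splitOn d.toList ['\n'], l ≠ []
instance (d : String) : Decidable (Pre_to_buffer d) := by unfold Pre_to_buffer; infer_instance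

def pvWitness_to_buffer : String := "## \n #"

def Spec_to_buffer (d : String) (out : List Int) : Prop := out = to_buffer_alt d
instance (d : String) (out : List Int) : Decidable (Spec_to_buffer d out) := by
  unfold Spec_to_buffer; infer_instance

-- ===== CLAIM (what is proved, stated in full; the proofs are below) =====
def Claim_equal_to_buffer : Prop :=
  ∀ (d : String), Dom_to_buffer d → Pre_to_buffer d → Spec_to_buffer d (to_buffer d)

-- ===== LEMMAS AND PROOFS =====

def pvBit (y : Nat) : Int := (1 : Int) <<< (y % 8 : Nat)
def pvStep (v : Int) (y : Nat) : Int := Int.lor v (pvBit y)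
lemma pvGetD_set (l : List Int) (j i : Nat) (v : Int) :
    (l.set j v).getD i 0 = if j = i ∧ j < l.length then v else l.getD i 0 := by
  simp only [List.getD_eq_getElem?_getD, List.getElem?_set]
  split_ifs with h1 h2 h3 h3 <;> simp_all <;> omega

lemma pvInner (W y : Nat) :
    ∀ (line : List Char) (x0 : Nat) (buf : List Int),
      y / 8 * W + W ≤ buf.length → x0 + line.length ≤ W →
      (line.foldl (fun (st2 : List Int × Nat) c =>
          (if c ≠ ' ' then set_pixelA st2.1 W st2.2 y else st2.1, st2.2 + 1)) (buf, x0)).1.length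
        = buf.length ∧
      ∀ i, (line.foldl (fun (st2 : List Int × Nat) c =>
          (if c ≠ ' ' then set_pixelA st2.1 W st2.2 y else st2.1, st2.2 + 1)) (buf, x0)).1.getD i 0
        = if x0 + y / 8 * W ≤ i ∧ i < x0 + line.length + y / 8 * W ∧
             line.getD (i - y / 8 * W - x0) ' ' ≠ ' '
          then pvStep (buf.getD i 0) y else buf.getD i 0 := by
  intro line
  induction line with
  | nil =>
    intro x0 buf _ _
    refine ⟨rfl, fun i => ?_⟩
    rw [if_neg]; · rfl
    rintro ⟨h1, h2, h3⟩; simp only [List.length_nil] at h2; omega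
  | cons c cs ih =>
    intro x0 buf hbuf hlen
    simp only [List.foldl_cons]
    set buf' : List Int := if c ≠ ' ' then set_pixelA buf W x0 y else buf with hbuf'def
    have hlen' : buf'.length = buf.length := by
      simp only [hbuf'def, set_pixelA]; split_ifs <;> simp
    have hb' : y / 8 * W + W ≤ buf'.length := by rw [hlen']; exact hbuf
    have hlc : x0 + (c :: cs).length ≤ W := hlen
    have hx0W : x0 < W := by simp only [List.length_cons] at hlc; omega
    have hx' : (x0 + 1) + cs.length ≤ W := by simp only [List.length_cons] at hlc; omega
    obtain ⟨ihlen, ihget⟩ := ih (x0 + 1) buf' hb' hx'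
    refine ⟨by rw [ihlen, hlen'], fun i => ?_⟩
    rw [ihget i]
    have hget' : ∀ i', buf'.getD i' 0 =
        if i' = x0 + y / 8 * W ∧ c ≠ ' ' then pvStep (buf.getD i' 0) y else buf.getD i' 0 := by
      intro i'
      simp only [hbuf'def, set_pixelA]
      by_cases hc : c = ' '
      · simp [hc]
      · simp only [hc, ne_eq, not_false_iff, if_true, and_true]
        rw [pvGetD_set]
        by_cases hi' : i' = x0 + y / 8 * W
        · rw [if_pos ⟨by omega, by omega⟩, if_pos hi', hi']; rfl
        · rw [if_neg (by rintro ⟨e, _⟩; omega), if_neg hi']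
    by_cases hi : i = x0 + y / 8 * W
    · have hbd : buf'.getD i 0 = if c ≠ ' ' then pvStep (buf.getD i 0) y else buf.getD i 0 := by
        rw [hget' i]
        by_cases hc : c = ' '
        · simp [hc]
        · rw [if_pos ⟨hi, hc⟩, if_pos hc]
      rw [if_neg (by rintro ⟨h1, _, _⟩; omega), hbd]
      have e0 : i - y / 8 * W - x0 = 0 := by omega
      simp only [e0, List.getD_cons_zero, List.length_cons]
      by_cases hc : c = ' '
      · rw [if_neg (by simpa using hc), if_neg (by rintro ⟨_, _, h3⟩; exact h3 hc)]
      · rw [if_pos hc, if_pos ⟨by omega, by omega, by simpa using hc⟩]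
    · have hbd : buf'.getD i 0 = buf.getD i 0 := by
        rw [hget' i, if_neg (by rintro ⟨e, _⟩; exact hi e)]
      rw [hbd]
      by_cases hlow : i < x0 + y / 8 * W
      · rw [if_neg (by rintro ⟨h1, _, _⟩; omega), if_neg (by rintro ⟨h1, _, _⟩; omega)]
      · have e1 : i - y / 8 * W - x0 = (i - y / 8 * W - (x0 + 1)) + 1 := by omega
        simp only [e1, List.getD_cons_succ, List.length_cons]
        exact if_congr (Iff.intro (fun ⟨a, b, cc⟩ => ⟨by omega, by omega, cc⟩)
          (fun ⟨a, b, cc⟩ => ⟨by omega, by omega, cc⟩)) rfl rfl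

abbrev pvTouch (W y : Nat) (L : List Char) (i : Nat) : Prop :=
  y / 8 * W ≤ i ∧ i - y / 8 * W < L.length ∧ L.getD (i - y / 8 * W) ' ' ≠ ' ' 

def pvAFold (W : Nat) : List (List Char) → Nat → Nat → Int → Int
  | [], _, _, v => v
  | L :: ls, y0, i, v => pvAFold W ls (y0 + 1) i (if pvTouch W y0 L i then pvStep v y0 else v)

lemma pvOuter (W : Nat) :
    ∀ (lines : List (List Char)) (y0 : Nat) (buf : List Int),
      (∀ l ∈ lines, l.length ≤ W) →
      (∀ y, y0 ≤ y → y < y0 + lines.length → y / 8 * W + W ≤ buf.length) →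
      (lines.foldl (fun (st : List Int × Nat) line =>
          ((line.foldl (fun (st2 : List Int × Nat) c =>
              (if c ≠ ' ' then set_pixelA st2.1 W st2.2 st.2 else st2.1, st2.2 + 1))
            (st.1, 0)).1, st.2 + 1)) (buf, y0)).1.length = buf.length ∧
      ∀ i, (lines.foldl (fun (st : List Int × Nat) line =>
          ((line.foldl (fun (st2 : List Int × Nat) c =>
              (if c ≠ ' ' then set_pixelA st2.1 W st2.2 st.2 else st2.1, st2.2 + 1))
            (st.1, 0)).1, st.2 + 1)) (buf, y0)).1.getD i 0
        = pvAFold W lines y0 i (buf.getD i 0) := by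
  intro lines
  induction lines with
  | nil => intro y0 buf _ _; exact ⟨rfl, fun i => rfl⟩
  | cons L ls ih =>
    intro y0 buf hW hbuf
    simp only [List.foldl_cons, List.length_cons]
    have hb0 : y0 / 8 * W + W ≤ buf.length := hbuf y0 le_rfl (by simp)
    have hl0 : 0 + L.length ≤ W := by simpa using hW L (.head _)
    obtain ⟨ilen, iget⟩ := pvInner W y0 L 0 buf hb0 hl0
    have hW' : ∀ l ∈ ls, l.length ≤ W := fun l hl => hW l (.tail _ hl)
    set buf1 := (L.foldl (fun (st2 : List Int × Nat) c =>
        (if c ≠ ' ' then set_pixelA st2.1 W st2.2 y0 else st2.1, st2.2 + 1)) (buf, 0)).1 with hb1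
    have hbuf' : ∀ y, y0 + 1 ≤ y → y < (y0 + 1) + ls.length → y / 8 * W + W ≤ buf1.length := by
      intro y h1 h2; rw [ilen]; exact hbuf y (by omega) (by simp; omega)
    obtain ⟨olen, oget⟩ := ih (y0 + 1) buf1 hW' hbuf'
    refine ⟨by rw [olen, ilen], fun i => ?_⟩
    rw [oget i]
    show pvAFold W ls (y0 + 1) i (buf1.getD i 0) = pvAFold W (L :: ls) y0 i (buf.getD i 0)
    have hg : buf1.getD i 0 = if pvTouch W y0 L i then pvStep (buf.getD i 0) y0 else buf.getD i 0 := by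
      rw [iget i]
      exact if_congr (Iff.intro
        (fun ⟨a, b, c⟩ => ⟨by omega, by omega, by simpa using c⟩)
        (fun ⟨a, b, c⟩ => ⟨by omega, by omega, by simpa using c⟩)) rfl rfl
    rw [hg]; rfl

lemma pvFoldl_ite_filter {α : Type} (p : α → Prop) [DecidablePred p] (f : Int → α → Int) :
    ∀ (l : List α) (v : Int),
      l.foldl (fun v a => if p a then f v a else v) v
        = (l.filter (fun a => decide (p a))).foldl f v := by
  intro l
  induction l with
  | nil => intro v; rfl
  | cons a t ih =>
    intro v
    by_cases h : p a <;> simp only [List.foldl_cons, List.filter_cons, h, decide_true,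
      decide_false, if_pos, if_neg, ite_true, ite_false] <;> [exact ih (f v a); exact ih v]

lemma pvAFold_eq_filter (W : Nat) :
    ∀ (lines : List (List Char)) (y0 i : Nat) (v : Int),
      pvAFold W lines y0 i v =
        ((List.range' y0 lines.length).filter
          (fun y => decide (pvTouch W y (lines.getD (y - y0) []) i))).foldl pvStep v := by
  intro lines
  induction lines with
  | nil => intro y0 i v; rfl
  | cons L ls ih =>
    intro y0 i v
    simp only [List.length_cons, List.range'_succ, List.filter_cons]
    have h0 : (L :: ls).getD (y0 - y0) [] = L := by simp
    have htail : (List.range' (y0 + 1) ls.length).filter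
          (fun y => decide (pvTouch W y ((L :: ls).getD (y - y0) []) i))
        = (List.range' (y0 + 1) ls.length).filter
          (fun y => decide (pvTouch W y (ls.getD (y - (y0 + 1)) []) i)) := by
      apply List.filter_congr
      intro y hy
      have hy1 : y0 + 1 ≤ y := (List.mem_range'_1.mp hy).1
      have e : y - y0 = (y - (y0 + 1)) + 1 := by omega
      rw [e, List.getD_cons_succ]
    rw [h0, htail]
    show pvAFold W ls (y0 + 1) i (if pvTouch W y0 L i then pvStep v y0 else v) = _
    by_cases h : pvTouch W y0 L i
    · rw [if_pos h, if_pos (by simpa using h), ih]; rfl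
    · rw [if_neg h, if_neg (by simpa using h), ih]

lemma pvTouch_iff (W b x y : Nat) (L : List Char) (i : Nat)
    (hi : W * b + x = i) (hx : x < W) (hL : L.length ≤ W) :
    pvTouch W y L i ↔ ((8 * b ≤ y ∧ y < 8 * b + 8) ∧ x < L.length ∧ L.getD x ' ' ≠ ' ') := by
  have h8 : (8 * b ≤ y ∧ y < 8 * b + 8) ↔ y / 8 = b := by omega
  have hidx : y / 8 = b → i - y / 8 * W = x := by
    intro hq; rw [hq, mul_comm]; omega
  have hq8 : y / 8 * W ≤ i → i - y / 8 * W < L.length → y / 8 = b := by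
    intro ha hb2
    rcases Nat.lt_trichotomy (y / 8) b with hq | hq | hq
    · exfalso
      have h1 : y / 8 * W + W ≤ b * W := by
        have := Nat.mul_le_mul_right W (show y / 8 + 1 ≤ b by omega)
        rwa [Nat.succ_mul] at this
      have h2 : b * W + x = i := by rw [← hi, mul_comm]
      omega
    · exact hq
    · exfalso
      have h1 : b * W + W ≤ y / 8 * W := by
        have := Nat.mul_le_mul_right W (show b + 1 ≤ y / 8 by omega)
        rwa [Nat.succ_mul] at this
      have h2 : b * W + x = i := by rw [← hi, mul_comm]
      omega
  unfold pvTouch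
  constructor
  · rintro ⟨ha, hb2, hc⟩
    have hq := hq8 ha hb2
    have he := hidx hq
    exact ⟨h8.mpr hq, by omega, by rwa [he] at hc⟩
  · rintro ⟨hy8, hxl, hc⟩
    have hq := h8.mp hy8
    have he := hidx hq
    have ha : y / 8 * W ≤ i := by rw [hq, mul_comm]; omega
    exact ⟨ha, by omega, by rwa [he]⟩

lemma pvLists_eq (W : Nat) (lines : List (List Char)) (i : Nat)
    (hW : ∀ l ∈ lines, l.length ≤ W)
    (hi : i < W * ((lines.length + 7) / 8)) :
    (List.range' 0 lines.length).filter
        (fun y => decide (pvTouch W y (lines.getD (y - 0) []) i))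
      = (List.range' (8 * (i / W)) 8).filter
        (fun y => decide (y < lines.length ∧ i % W < (lines.getD y []).length ∧
          (lines.getD y []).getD (i % W) ' ' ≠ ' ')) := by
  have hW0 : 0 < W := by
    rcases Nat.eq_zero_or_pos W with h | h
    · rw [h] at hi; simp at hi
    · exact h
  have hdm : W * (i / W) + i % W = i := Nat.div_add_mod i W
  have hxW : i % W < W := Nat.mod_lt _ hW0
  apply List.eq_of_perm_of_sorted (le := (· < ·)) (fun a b _ _ h1 h2 => by omega)
  · exact (List.pairwise_lt_range' 1).filter _
  · exact (List.pairwise_lt_range' 1).filter _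
  · rw [List.perm_ext_iff_of_nodup
      (((List.pairwise_lt_range' 1).filter _).nodup) (((List.pairwise_lt_range' 1).filter _).nodup)]
    intro y
    simp only [List.mem_filter, List.mem_range'_1, decide_eq_true_eq]
    constructor
    · rintro ⟨⟨_, hyH⟩, ht⟩
      simp only [Nat.zero_add] at hyH
      have hLmem : lines.getD y [] ∈ lines := by
        rw [List.getD_eq_getElem _ _ (by omega)]; exact List.getElem_mem _
      have := (pvTouch_iff W (i / W) (i % W) y _ i hdm hxW (hW _ hLmem)).mp (by simpa using ht)
      exact ⟨⟨this.1.1, by omega⟩, hyH, this.2.1, this.2.2⟩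
    · rintro ⟨⟨hy1, hy2⟩, hyH, hxl, hc⟩
      have hLmem : lines.getD y [] ∈ lines := by
        rw [List.getD_eq_getElem _ _ (by omega)]; exact List.getElem_mem _
      refine ⟨⟨by omega, by omega⟩, ?_⟩
      simp only [Nat.sub_zero, decide_eq_true_eq]
      exact (pvTouch_iff W (i / W) (i % W) y _ i hdm hxW (hW _ hLmem)).mpr ⟨⟨hy1, by omega⟩, hxl, hc⟩

lemma pvFlat_length (W' : Nat) :
    ∀ (m : Nat) (g : Nat → List Int), (∀ b, (g b).length = W') →
      ((List.range m).flatMap g).length = m * W' := by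
  intro m
  induction m with
  | zero => intro g _; simp
  | succ n ih =>
    intro g hg
    rw [List.range_succ_eq_map, List.flatMap_cons, List.flatMap_map, List.length_append,
      hg 0, ih (fun b => g (b.succ)) (fun b => hg _)]
    ring

lemma pvFlat_getD (W' : Nat) :
    ∀ (m : Nat) (g : Nat → List Int), (∀ b, (g b).length = W') → ∀ i, i < m * W' →
      ((List.range m).flatMap g).getD i 0 = (g (i / W')).getD (i % W') 0 := by
  intro m
  induction m with
  | zero => intro g _ i hi; simp at hi
  | succ n ih =>
    intro g hg i hi
    have hW0 : 0 < W' := by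
      rcases Nat.eq_zero_or_pos W' with h | h
      · rw [h, Nat.mul_zero] at hi; omega
      · exact h
    rw [List.range_succ_eq_map, List.flatMap_cons, List.flatMap_map]
    by_cases hiW : i < W'
    · rw [List.getD_append _ _ _ _ (by rw [hg 0]; exact hiW),
        Nat.div_eq_of_lt hiW, Nat.mod_eq_of_lt hiW]
    · obtain ⟨j, rfl⟩ : ∃ j, i = W' + j := ⟨i - W', by omega⟩
      rw [List.getD_append_right _ _ _ _ (by rw [hg 0]; omega), hg 0]
      have e1 : W' + j - W' = j := by omega
      have e2 : (W' + j) / W' = j / W' + 1 := by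
        rw [Nat.add_comm, Nat.add_div_right _ hW0]
      have e3 : (W' + j) % W' = j % W' := by rw [Nat.add_comm, Nat.add_mod_right]
      rw [e1, e2, e3, ih (fun b => g b.succ) (fun b => hg _) j (by
        have := hi; rw [Nat.succ_mul] at this; omega)]

lemma pvDropEmptyA_eq : ∀ (ls : List (List Char)),
    pvDropEmptyA ls = if (ls.dropWhile (fun l => l.isEmpty)) = [] then none
      else some (ls.dropWhile (fun l => l.isEmpty)) := by
  intro ls
  induction ls with
  | nil => rfl
  | cons l ls ih =>
    rw [pvDropEmptyA, List.dropWhile_cons]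
    by_cases h : l.isEmpty
    · have h0 : l.length = 0 := by simpa [List.isEmpty_iff_length_eq_zero] using h
      rw [if_pos h0, ih, if_pos h]
    · have h0 : ¬ (l.length = 0) := by simpa [List.isEmpty_iff_length_eq_zero] using h
      rw [if_neg h0, if_neg h, if_neg (by simp)]

lemma pvGlyphB_eq (lines : List (List Char)) (H b x : Nat) :
    glyph_byteB lines H b x
      = ((List.range' (8 * b) 8).filter
          (fun y => decide (y < H ∧ x < (lines.getD y []).length ∧
            (lines.getD y []).getD x ' ' ≠ ' '))).foldl pvStep 0 :=
  pvFoldl_ite_filter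
    (fun y => y < H ∧ x < (lines.getD y []).length ∧ (lines.getD y []).getD x ' ' ≠ ' ')
    pvStep (List.range' (8 * b) 8) 0

-- ===== VERDICT (by name: the statement is the Claim_ definition above) =====
theorem to_buffer_spec : Claim_equal_to_buffer := by
  intro d _hdom hpre
  unfold Spec_to_buffer to_buffer to_buffer_alt split_glyphA
  obtain ⟨l0, hl0mem, hl0ne⟩ := hpre
  set lines0 := PySem.Chars.splitOn d.toList ['\n'] with hlines0
  have hne : lines0.dropWhile (fun l => l.isEmpty) ≠ [] := by
    rw [Ne, List.dropWhile_eq_nil_iff]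
    intro hall
    exact hl0ne (List.isEmpty_iff.mp (hall l0 hl0mem))
  obtain ⟨l, ls, hdrop⟩ : ∃ l ls, lines0.dropWhile (fun l => l.isEmpty) = l :: ls := by
    cases h : lines0.dropWhile (fun l => l.isEmpty) with
    | nil => exact absurd h hne
    | cons a t => exact ⟨a, t, rfl⟩
  have hlen0 : ¬ (lines0.length = 0) := by
    rw [List.length_eq_zero_iff]
    intro h; rw [h] at hdrop; simp at hdrop
  rw [if_neg hlen0, pvDropEmptyA_eq, hdrop, if_neg (by simp)]
  simp only
  set lines := l :: ls with hlines
  set H := lines.length with hH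
  set W := ((lines.map List.length).foldl max 0) with hWdef
  have hWB : (ls.map List.length).foldl max l.length = W := by
    rw [hWdef, hlines, List.map_cons, List.foldl_cons, Nat.zero_max]
  rw [hWB]
  -- facts about W
  have hW : ∀ L ∈ lines, L.length ≤ W := by
    intro L hL
    rw [hWdef, List.foldl_map]
    exact (PySem.List.le_foldl_max_nat lines List.length 0).2 L hL
  -- the buffer and the outer loop
  have hbuf : ∀ y, 0 ≤ y → y < 0 + lines.length →
      y / 8 * W + W ≤ (List.replicate (buffer_sizeA W H) (0 : Int)).length := by
    intro y _ hy
    rw [List.length_replicate, buffer_sizeA]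
    have h1 : y / 8 + 1 ≤ (H + 7) / 8 := by rw [hH]; simp at hy ⊢; omega
    calc y / 8 * W + W = (y / 8 + 1) * W := by rw [Nat.succ_mul]
    _ ≤ (H + 7) / 8 * W := Nat.mul_le_mul_right W h1
    _ = W * ((H + 7) / 8) := Nat.mul_comm _ _
  obtain ⟨olen, oget⟩ := pvOuter W lines 0 (List.replicate (buffer_sizeA W H) (0 : Int)) hW hbuf
  have hglen : ∀ b, ((List.range W).map (fun x => glyph_byteB lines H b x)).length = W := by
    intro b; simp
  apply List.ext_getElem
  · rw [olen, List.length_replicate, buffer_sizeA,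
      pvFlat_length W _ (fun b => (List.range W).map (fun x => glyph_byteB lines H b x)) hglen, Nat.mul_comm]
  · intro i h1 h2
    have hiW : i < W * ((H + 7) / 8) := by
      rw [olen, List.length_replicate, buffer_sizeA] at h1; exact h1
    rw [← List.getD_eq_getElem _ 0 h1, ← List.getD_eq_getElem _ 0 h2, oget i,
      pvFlat_getD W _ (fun b => (List.range W).map (fun x => glyph_byteB lines H b x)) hglen i (by rw [Nat.mul_comm]; exact hiW)]
    have hz : (List.replicate (buffer_sizeA W H) (0 : Int)).getD i 0 = 0 := by
      rw [List.getD_replicate]; rw [buffer_sizeA]; exact hiW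
    have hW0 : 0 < W := by
      rcases Nat.eq_zero_or_pos W with h | h
      · rw [h, Nat.zero_mul] at hiW; omega
      · exact h
    have hmap : ((List.range W).map (fun x => glyph_byteB lines H (i / W) x)).getD (i % W) 0
        = glyph_byteB lines H (i / W) (i % W) := by
      rw [List.getD_eq_getElem _ 0 (by simpa using Nat.mod_lt i hW0)]
      simp
    rw [hz, pvAFold_eq_filter, hmap, pvGlyphB_eq,
      pvLists_eq W lines i hW (by rw [← hH]; exact hiW)]
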